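-- pv_equiv track=rewrite | github.com/YesManBelov/parser_vac | src/parsing_functions/parser_engine.py | get_domain_name
-- ===== SOURCE A (Python) =====
-- def get_domain_name(url):
--     oc_num = 3
--     index = -1
--     for _ in range(oc_num):
--         index = url.find('/', index + 1)
--     if index != -1 and url[:index].count('/') == 2:
--         return url[:index]
--     return ''
-- ===== SOURCE B (Python) =====
-- def get_domain_name(url):
--     parts = url.split('/')
--     if len(parts) >= 4:
--         return '/'.join(parts[:3])
--     return ''
-- ===== Notes on version B (the rewrite author's own statement) =====
-- stated objective: idiomatic
-- what changed: Replaces the fixed three-iteration find-with-restart loop and its slash-count guard by a single split on the slash separator followed by rejoining the first three segments when at least three separators exist.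
import Mathlib
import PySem

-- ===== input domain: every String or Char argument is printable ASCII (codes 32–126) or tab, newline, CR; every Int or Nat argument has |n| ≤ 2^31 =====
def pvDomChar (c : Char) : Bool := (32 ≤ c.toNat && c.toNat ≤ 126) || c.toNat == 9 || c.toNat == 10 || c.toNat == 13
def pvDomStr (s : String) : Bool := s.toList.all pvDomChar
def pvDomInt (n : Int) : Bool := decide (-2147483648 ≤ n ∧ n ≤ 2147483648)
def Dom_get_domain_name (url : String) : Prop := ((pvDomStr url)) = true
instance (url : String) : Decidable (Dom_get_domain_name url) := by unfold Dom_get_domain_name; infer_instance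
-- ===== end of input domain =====

-- B replaces A's fixed three-iteration find(+restart) loop and count('/')==2 guard by one
-- split('/') and a rejoin of the first three segments (idiomatic; same cost).


-- ===== PORT A =====
-- for _ in range(3): index = url.find('/', index + 1)
def get_domain_name (url : String) : String :=
  let index : Int :=
    (PySem.List.pyRange 0 3 1).foldl (fun index _ => PySem.Str.findFrom url "/" (index + 1)) (-1)
  if index ≠ -1 ∧ PySem.Str.count (PySem.Str.slice url none (some index)) "/" = 2 then
    PySem.Str.slice url none (some index)
  else ""

-- ===== PORT B =====
def get_domain_name_alt (url : String) : String :=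
  match PySem.Str.split? url "/" with
  | some parts =>
      if 4 ≤ parts.length then PySem.Str.join "/" (PySem.List.slice parts none (some 3)) else ""
  | none => ""   -- unreachable: the separator "/" is nonempty

-- ===== PRECONDITION & SPEC =====
def Spec_get_domain_name (url : String) (out : String) : Prop := out = get_domain_name_alt url
instance (url : String) (out : String) : Decidable (Spec_get_domain_name url out) := by unfold Spec_get_domain_name; infer_instance

-- ===== CLAIM (what is proved, stated in full; the proofs are below) =====
def Claim_equal_get_domain_name : Prop := ∀ (url : String), Dom_get_domain_name url → Spec_get_domain_name url (get_domain_name url)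

-- ===== LEMMAS AND PROOFS =====

-- the two ports, pushed down to lists of characters
def pvACh (cs : List Char) : List Char :=
  let i1 := PySem.Chars.findFrom cs ['/'] 0
  let i2 := PySem.Chars.findFrom cs ['/'] (i1 + 1)
  let i3 := PySem.Chars.findFrom cs ['/'] (i2 + 1)
  if i3 ≠ -1 ∧ PySem.Chars.count (PySem.List.slice cs none (some i3)) ['/'] = 2 then
    PySem.List.slice cs none (some i3)
  else []

def pvBCh (cs : List Char) : List Char :=
  let ps := PySem.Chars.splitOn cs ['/']
  if 4 ≤ ps.length then PySem.Chars.join ['/'] (PySem.List.slice ps none (some 3)) else []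

-- reference splitter for a single-character separator
def pvSplit : List Char → List (List Char)
  | [] => [[]]
  | c :: t => if c = '/' then [] :: pvSplit t else (pvSplit t).modifyHead (c :: ·)

lemma pvSplit_ne_nil (l : List Char) : pvSplit l ≠ [] := by
  cases l with
  | nil => simp [pvSplit]
  | cons c t =>
    simp only [pvSplit]
    split_ifs
    · simp
    · intro h
      have := pvSplit_ne_nil t
      cases hs : pvSplit t with
      | nil => exact this hs
      | cons a b => rw [hs] at h; simp at h

lemma pvSplit_no {l : List Char} (h : '/' ∉ l) : pvSplit l = [l] := by
  induction l with
  | nil => rfl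
  | cons c t ih =>
    have hc : ¬ c = '/' := by intro e; exact h (by simp [e])
    have ht : '/' ∉ t := fun m => h (by simp [m])
    simp [pvSplit, hc, ih ht]

lemma pvSplit_app {a : List Char} (t : List Char) (h : '/' ∉ a) :
    pvSplit (a ++ '/' :: t) = a :: pvSplit t := by
  induction a with
  | nil => simp [pvSplit]
  | cons c a' ih =>
    have hc : ¬ c = '/' := by intro e; exact h (by simp [e])
    have ha : '/' ∉ a' := fun m => h (by simp [m])
    simp [pvSplit, hc, ih ha]

-- find.go equations and characterisations
lemma pvFindGo_cons (c : Char) (t : List Char) (k : Nat) :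
    PySem.Chars.find.go ['/'] (c :: t) k =
      if c = '/' then (k : Int) else PySem.Chars.find.go ['/'] t (k + 1) := by
  show (if List.isPrefixOf ['/'] (c :: t) then (k : Int) else PySem.Chars.find.go ['/'] t (k + 1)) = _
  by_cases h : c = '/' <;> simp [List.isPrefixOf, h, BEq.comm]

lemma pvFindGo_no {l : List Char} (h : '/' ∉ l) (k : Nat) :
    PySem.Chars.find.go ['/'] l k = -1 := by
  induction l generalizing k with
  | nil => rfl
  | cons c t ih =>
    have hc : ¬ c = '/' := by intro e; exact h (by simp [e])
    have ht : '/' ∉ t := fun m => h (by simp [m])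
    rw [pvFindGo_cons]; simp [hc, ih ht]

lemma pvFindGo_pos {a : List Char} (t : List Char) (h : '/' ∉ a) (k : Nat) :
    PySem.Chars.find.go ['/'] (a ++ '/' :: t) k = (k : Int) + a.length := by
  induction a generalizing k with
  | nil => simp [pvFindGo_cons]
  | cons c a' ih =>
    have hc : ¬ c = '/' := by intro e; exact h (by simp [e])
    have ha : '/' ∉ a' := fun m => h (by simp [m])
    rw [List.cons_append, pvFindGo_cons]
    simp only [hc, if_false, ih ha, List.length_cons]
    push_cast
    ring

lemma pvFind_no {l : List Char} (h : '/' ∉ l) : PySem.Chars.find l ['/'] = -1 :=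
  pvFindGo_no h 0

lemma pvFind_pos {a : List Char} (t : List Char) (h : '/' ∉ a) :
    PySem.Chars.find (a ++ '/' :: t) ['/'] = (a.length : Int) := by
  show PySem.Chars.find.go ['/'] (a ++ '/' :: t) 0 = _
  rw [pvFindGo_pos t h 0]; simp

-- count with a single-character needle is List.count
lemma pvCountGo (l : List Char) (fuel acc : Nat) (hf : l.length ≤ fuel) :
    PySem.Chars.count.go ['/'] fuel l acc = acc + l.count '/' := by
  induction l generalizing fuel acc with
  | nil => cases fuel <;> simp [PySem.Chars.count.go]
  | cons c t ih =>
    cases fuel with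
    | zero => simp at hf
    | succ f =>
      have hf' : t.length ≤ f := by simpa using hf
      show (if List.isPrefixOf ['/'] (c :: t) then
              PySem.Chars.count.go ['/'] f (List.drop 1 (c :: t)) (acc + 1)
            else PySem.Chars.count.go ['/'] f t acc) = _
      by_cases h : c = '/' <;>
        simp [List.isPrefixOf, h, BEq.comm, ih _ _ hf', List.count_cons] <;> omega

lemma pvCount_single (l : List Char) : PySem.Chars.count l ['/'] = l.count '/' := by
  simp [PySem.Chars.count, pvCountGo l l.length 0 le_rfl]

-- splitOn with a single-character separator is pvSplit
lemma pvSplitGo (l : List Char) (fuel : Nat) (cur : List Char) (acc : List (List Char))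
    (hf : l.length < fuel) :
    PySem.Chars.splitOn.go ['/'] fuel l cur acc =
      acc.reverse ++ (pvSplit l).modifyHead (cur.reverse ++ ·) := by
  induction l generalizing fuel cur acc with
  | nil =>
    cases fuel with
    | zero => omega
    | succ f => simp [PySem.Chars.splitOn.go, pvSplit]
  | cons c t ih =>
    cases fuel with
    | zero => omega
    | succ f =>
      have hf' : t.length < f := by simpa using hf
      show (if List.isPrefixOf ['/'] (c :: t) then
              PySem.Chars.splitOn.go ['/'] f (List.drop 1 (c :: t)) [] (cur.reverse :: acc)
            else PySem.Chars.splitOn.go ['/'] f t (c :: cur) acc) = _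
      by_cases h : c = '/'
      · have hid : List.modifyHead (fun x => x) (pvSplit t) = pvSplit t := by
          cases pvSplit t <;> simp [List.modifyHead]
        simp [List.isPrefixOf, h, ih _ _ _ hf', pvSplit, hid]
      · have hcc : ('/' : Char) ≠ c := fun e => h e.symm
        have hb : List.isPrefixOf ['/'] (c :: t) = false := by
          simp [List.isPrefixOf, hcc]
        simp only [hb, Bool.false_eq_true, if_false, ih _ _ _ hf', pvSplit, if_neg h]
        cases hs : pvSplit t with
        | nil => exact absurd hs (pvSplit_ne_nil t)
        | cons x xs => simp [List.modifyHead]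

lemma pvSplitOn_eq (l : List Char) : PySem.Chars.splitOn l ['/'] = pvSplit l := by
  show PySem.Chars.splitOn.go ['/'] (l.length + 1) l [] [] = _
  rw [pvSplitGo l (l.length + 1) [] [] (by omega)]
  cases hs : pvSplit l with
  | nil => exact absurd hs (pvSplit_ne_nil l)
  | cons x xs => simp [List.modifyHead]

-- first-slash decomposition
lemma pvSplitFirst (l : List Char) :
    '/' ∉ l ∨ ∃ a t, l = a ++ '/' :: t ∧ '/' ∉ a := by
  induction l with
  | nil => left; simp
  | cons c t ih =>
    by_cases hc : c = '/'
    · right; exact ⟨[], t, by simp [hc], by simp⟩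
    · rcases ih with h | ⟨a, t', he, ha⟩
      · left
        intro m
        rcases List.mem_cons.mp m with e | m2
        · exact hc e.symm
        · exact h m2
      · right
        refine ⟨c :: a, t', by simp [he], ?_⟩
        intro m
        rcases List.mem_cons.mp m with e | m2
        · exact hc e.symm
        · exact ha m2

lemma pvCharsMain (cs : List Char) : pvACh cs = pvBCh cs := by
  rcases pvSplitFirst cs with h0 | ⟨a, t1, rfl, ha⟩
  · -- no slash at all
    simp [pvACh, pvBCh, PySem.Chars.findFrom_zero, pvFind_no h0, pvSplitOn_eq, pvSplit_no h0]
  · rcases pvSplitFirst t1 with h1 | ⟨b, t2, rfl, hb⟩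
    · -- exactly one slash
      have hi1 : PySem.Chars.findFrom (a ++ '/' :: t1) ['/'] 0 = (a.length : Int) := by
        rw [PySem.Chars.findFrom_zero, pvFind_pos t1 ha]
      have hk : a.length + 1 ≤ (a ++ '/' :: t1).length := by simp
      have hd : List.drop (a.length + 1) (a ++ '/' :: t1) = t1 := by
        rw [show a ++ '/' :: t1 = (a ++ ['/']) ++ t1 by simp, List.drop_append_of_le_length (by simp)]
        simp
      have hi2 : PySem.Chars.findFrom (a ++ '/' :: t1) ['/'] ((a.length : Int) + 1) = -1 := by
        rw [show (a.length : Int) + 1 = ((a.length + 1 : Nat) : Int) by push_cast; ring,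
          PySem.Chars.findFrom_natCast _ _ _ hk, hd, pvFind_no h1]
        simp
      have hsl : PySem.List.slice (a ++ '/' :: t1) none (some (a.length : Int)) = a := by
        rw [PySem.List.slice_to _ (by positivity)]
        simp [List.take_append_of_le_length]
      simp only [pvACh, pvBCh, hi1, hi2, neg_add_cancel, PySem.Chars.findFrom_zero,
        pvFind_pos t1 ha, hsl, pvSplitOn_eq, pvSplit_app t1 ha, pvSplit_no h1,
        pvCount_single]
      rw [if_neg, if_neg]
      · simp
      · intro hcon
        have := hcon.2
        rw [List.count_eq_zero.mpr ha] at this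
        omega
    · rcases pvSplitFirst t2 with h2 | ⟨c, t3, rfl, hc⟩
      · -- exactly two slashes
        have hk2 : a.length + 1 ≤ (a ++ '/' :: (b ++ '/' :: t2)).length := by simp
        have hd2 : List.drop (a.length + 1) (a ++ '/' :: (b ++ '/' :: t2)) = b ++ '/' :: t2 := by
          rw [show a ++ '/' :: (b ++ '/' :: t2) = (a ++ ['/']) ++ (b ++ '/' :: t2) by simp,
            List.drop_append_of_le_length (by simp)]
          simp
        have hi2 : PySem.Chars.findFrom (a ++ '/' :: (b ++ '/' :: t2)) ['/'] ((a.length : Int) + 1)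
            = ((a.length + 1 + b.length : Nat) : Int) := by
          rw [show (a.length : Int) + 1 = ((a.length + 1 : Nat) : Int) by push_cast; ring,
            PySem.Chars.findFrom_natCast _ _ _ hk2, hd2, pvFind_pos t2 hb]
          rw [if_neg (by omega)]
          push_cast; ring
        have hk3 : a.length + 1 + b.length + 1 ≤ (a ++ '/' :: (b ++ '/' :: t2)).length := by
          simp
          omega
        have hd3 : List.drop (a.length + 1 + b.length + 1) (a ++ '/' :: (b ++ '/' :: t2)) = t2 := by
          rw [show a ++ '/' :: (b ++ '/' :: t2) = ((a ++ ['/']) ++ (b ++ ['/'])) ++ t2 by simp,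
            List.drop_left' (l₁ := (a ++ ['/']) ++ (b ++ ['/'])) (by simp; omega)]
        have hi3 : PySem.Chars.findFrom (a ++ '/' :: (b ++ '/' :: t2)) ['/']
            (((a.length + 1 + b.length : Nat) : Int) + 1) = -1 := by
          rw [show ((a.length + 1 + b.length : Nat) : Int) + 1
                = ((a.length + 1 + b.length + 1 : Nat) : Int) by push_cast; ring,
            PySem.Chars.findFrom_natCast _ _ _ hk3, hd3, pvFind_no h2]
          simp
        simp only [pvACh, pvBCh, PySem.Chars.findFrom_zero, pvFind_pos _ ha, hi2, hi3,
          pvSplitOn_eq, pvSplit_app _ ha, pvSplit_app t2 hb, pvSplit_no h2]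
        rw [if_neg (by simp), if_neg (by simp)]
      · -- three or more slashes
        have hk2 : a.length + 1 ≤ (a ++ '/' :: (b ++ '/' :: (c ++ '/' :: t3))).length := by simp
        have hd2 : List.drop (a.length + 1) (a ++ '/' :: (b ++ '/' :: (c ++ '/' :: t3)))
            = b ++ '/' :: (c ++ '/' :: t3) := by
          rw [show a ++ '/' :: (b ++ '/' :: (c ++ '/' :: t3))
                = (a ++ ['/']) ++ (b ++ '/' :: (c ++ '/' :: t3)) by simp,
            List.drop_append_of_le_length (by simp)]
          simp
        have hi2 : PySem.Chars.findFrom (a ++ '/' :: (b ++ '/' :: (c ++ '/' :: t3))) ['/']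
            ((a.length : Int) + 1) = ((a.length + 1 + b.length : Nat) : Int) := by
          rw [show (a.length : Int) + 1 = ((a.length + 1 : Nat) : Int) by push_cast; ring,
            PySem.Chars.findFrom_natCast _ _ _ hk2, hd2, pvFind_pos _ hb]
          rw [if_neg (by omega)]
          push_cast; ring
        have hk3 : a.length + 1 + b.length + 1
            ≤ (a ++ '/' :: (b ++ '/' :: (c ++ '/' :: t3))).length := by
          simp
          omega
        have hd3 : List.drop (a.length + 1 + b.length + 1)
            (a ++ '/' :: (b ++ '/' :: (c ++ '/' :: t3))) = c ++ '/' :: t3 := by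
          rw [show a ++ '/' :: (b ++ '/' :: (c ++ '/' :: t3))
                = ((a ++ ['/']) ++ (b ++ ['/'])) ++ (c ++ '/' :: t3) by simp,
            List.drop_left' (l₁ := (a ++ ['/']) ++ (b ++ ['/'])) (by simp; omega)]
        have hi3 : PySem.Chars.findFrom (a ++ '/' :: (b ++ '/' :: (c ++ '/' :: t3))) ['/']
            (((a.length + 1 + b.length : Nat) : Int) + 1)
            = ((a.length + 1 + b.length + 1 + c.length : Nat) : Int) := by
          rw [show ((a.length + 1 + b.length : Nat) : Int) + 1
                = ((a.length + 1 + b.length + 1 : Nat) : Int) by push_cast; ring,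
            PySem.Chars.findFrom_natCast _ _ _ hk3, hd3, pvFind_pos _ hc]
          rw [if_neg (by omega)]
          push_cast; ring
        have hsl : PySem.List.slice (a ++ '/' :: (b ++ '/' :: (c ++ '/' :: t3))) none
            (some ((a.length + 1 + b.length + 1 + c.length : Nat) : Int))
            = a ++ '/' :: (b ++ '/' :: c) := by
          rw [PySem.List.slice_to _ (by positivity), Int.toNat_natCast,
            show a ++ '/' :: (b ++ '/' :: (c ++ '/' :: t3))
              = (a ++ '/' :: (b ++ '/' :: c)) ++ '/' :: t3 by simp,
            List.take_append_of_le_length (by simp; omega)]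
          rw [List.take_of_length_le (by simp; omega)]
        have hcnt : (a ++ '/' :: (b ++ '/' :: c)).count '/' = 2 := by
          simp [List.count_append, List.count_cons, List.count_eq_zero.mpr ha,
            List.count_eq_zero.mpr hb, List.count_eq_zero.mpr hc]
        simp only [pvACh, pvBCh, PySem.Chars.findFrom_zero, pvFind_pos _ ha, hi2, hi3,
          pvSplitOn_eq, pvSplit_app _ ha, pvSplit_app _ hb, pvSplit_app t3 hc, hsl,
          pvCount_single, hcnt]
        rw [if_pos ?hcond, if_pos ?hlen]
        case hcond =>
          constructor
          · omega
          · trivial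
        case hlen =>
          cases hs : pvSplit t3 with
          | nil => exact absurd hs (pvSplit_ne_nil t3)
          | cons x xs => simp
        rw [PySem.List.slice_to _ (by norm_num)]
        simp [PySem.Chars.join, List.intercalate]

theorem pvStrA (url : String) : get_domain_name url = String.ofList (pvACh url.toList) := by
  have hr : PySem.List.pyRange 0 3 1 = [0, 1, 2] := by decide
  simp only [get_domain_name, hr, List.foldl]
  simp only [pvACh, PySem.Str.findFrom, PySem.Str.count, PySem.Str.slice,
    show ("/" : String).toList = ['/'] from rfl, String.toList_ofList,
    PySem.Chars.slice_eq_listSlice, show ((-1 : Int) + 1) = 0 from by norm_num]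
  split_ifs with h1
  · rfl
  · rfl

theorem pvStrB (url : String) : get_domain_name_alt url = String.ofList (pvBCh url.toList) := by
  have hsplit : PySem.Str.split? url "/"
      = some ((PySem.Chars.splitOn url.toList ['/']).map String.ofList) := by
    simp [PySem.Str.split?, PySem.Chars.split?, show ("/" : String).toList = ['/'] from rfl]
  simp only [get_domain_name_alt, hsplit, pvBCh, List.length_map]
  by_cases h : 4 ≤ (PySem.Chars.splitOn url.toList ['/']).length
  · rw [if_pos h, if_pos h]
    rw [PySem.List.slice_to _ (by norm_num), PySem.List.slice_to _ (by norm_num)]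
    simp [PySem.Str.join, show ("/" : String).toList = ['/'] from rfl, List.map_take,
      List.map_map, Function.comp_def]
  · rw [if_neg h, if_neg h]

-- ===== VERDICT (by name: the statement is the Claim_ definition above) =====
theorem get_domain_name_spec : Claim_equal_get_domain_name := by
  intro url _
  show get_domain_name url = get_domain_name_alt url
  rw [pvStrA, pvStrB, pvCharsMain]
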